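-- pv_equiv track=rewrite | github.com/crate-1556/tjs2-decompiler | tjs2_formatting.py | _split_condition
-- ===== SOURCE A (Python) =====
-- def _split_condition(condition: str) -> list:
--     parts = []
--     current = []
--     depth = 0
--     in_string = None
--     i = 0
--     text = condition
--     while i < len(text):
--         ch = text[i]
--         if in_string:
--             if ch == '\\':
--                 current.append(ch)
--                 i += 1
--                 if i < len(text):
--                     current.append(text[i])
--                 i += 1
--                 continue
--             if ch == in_string:
--                 in_string = None
--             current.append(ch)
--         elif ch in ('"', "'"):
--             in_string = ch
--             current.append(ch)
--         elif ch in ('(', '[', '{'):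
--             depth += 1
--             current.append(ch)
--         elif ch in (')', ']', '}'):
--             depth -= 1
--             current.append(ch)
--         elif depth == 0 and i + 1 < len(text) and text[i:i+2] in ('&&', '||'):
--             parts.append(''.join(current).strip())
--             op = text[i:i+2]
--             current = [op + ' ']
--             i += 2
--             continue
--         else:
--             current.append(ch)
--         i += 1
--
--     remaining = ''.join(current).strip()
--     if remaining:
--         parts.append(remaining)
--     return parts
-- ===== SOURCE B (Python) =====
-- def _split_condition(condition: str) -> list:
--     text = condition
--     n = len(text)
--     bounds = []  # (position, operator) of each top-level && / ||
--     depth = 0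
--     in_string = None
--     i = 0
--     while i < n:
--         ch = text[i]
--         if in_string:
--             if ch == '\\':
--                 i += 2
--                 continue
--             if ch == in_string:
--                 in_string = None
--         elif ch in ('"', "'"):
--             in_string = ch
--         elif ch in ('(', '[', '{'):
--             depth += 1
--         elif ch in (')', ']', '}'):
--             depth -= 1
--         elif depth == 0 and i + 1 < n and text[i:i+2] in ('&&', '||'):
--             bounds.append((i, text[i:i+2]))
--             i += 2
--             continue
--         i += 1
--     parts = []
--     prefix = ''
--     start = 0
--     for pos, op in bounds:
--         parts.append((prefix + text[start:pos]).strip())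
--         prefix = op + ' '
--         start = pos + 2
--     last = (prefix + text[start:]).strip()
--     if last:
--         parts.append(last)
--     return parts
-- ===== Notes on version B (the rewrite author's own statement) =====
-- stated objective: alternative
-- what changed: Instead of accumulating a character buffer and flushing it at each split, B's scan only records (position, operator) boundaries and a second pass slices the original string at those boundaries, stripping each slice with its operator prefix.
import Mathlib
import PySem

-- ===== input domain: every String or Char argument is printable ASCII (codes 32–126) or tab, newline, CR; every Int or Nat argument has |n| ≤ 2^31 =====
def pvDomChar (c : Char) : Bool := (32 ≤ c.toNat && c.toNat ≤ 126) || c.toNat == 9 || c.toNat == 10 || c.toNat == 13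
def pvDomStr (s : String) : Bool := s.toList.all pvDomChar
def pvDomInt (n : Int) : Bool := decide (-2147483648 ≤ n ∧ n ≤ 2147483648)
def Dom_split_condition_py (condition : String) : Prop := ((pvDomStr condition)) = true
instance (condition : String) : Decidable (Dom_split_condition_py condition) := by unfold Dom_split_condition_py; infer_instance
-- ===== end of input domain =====

-- B records (position, operator) boundaries in one scan and slices the string afterwards,
-- instead of A's character accumulator; same result, alternative decomposition.

-- ===== PORT A =====
-- A's `current` list of appended characters (the op+' ' entry flattened by ''.join) is a List Char.
def loopA (cs : List Char) (i : Nat) (parts : List String) (current : List Char)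
    (depth : Int) (instr : Option Char) : List String :=
  if h : i < cs.length then
    let ch := cs[i]
    match instr with
    | some q =>
      if ch = '\\' then
        loopA cs (i+2) parts (current ++ [ch] ++ cs[i+1]?.toList) depth (some q)
      else if ch = q then
        loopA cs (i+1) parts (current ++ [ch]) depth none
      else
        loopA cs (i+1) parts (current ++ [ch]) depth (some q)
    | none =>
      if ch = '"' ∨ ch = '\'' then
        loopA cs (i+1) parts (current ++ [ch]) depth (some ch)
      else if ch = '(' ∨ ch = '[' ∨ ch = '{' then
        loopA cs (i+1) parts (current ++ [ch]) (depth + 1) none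
      else if ch = ')' ∨ ch = ']' ∨ ch = '}' then
        loopA cs (i+1) parts (current ++ [ch]) (depth - 1) none
      else if depth = 0 ∧ i+1 < cs.length ∧ ((ch = '&' ∧ cs[i+1]? = some '&') ∨ (ch = '|' ∧ cs[i+1]? = some '|')) then
        loopA cs (i+2) (parts ++ [String.ofList (PySem.Chars.strip current)])
          (ch :: (cs[i+1]?.toList ++ [' '])) depth none
      else
        loopA cs (i+1) parts (current ++ [ch]) depth none
  else
    let remaining := PySem.Chars.strip current
    if remaining = [] then parts else parts ++ [String.ofList remaining]
termination_by cs.length - i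
decreasing_by all_goals omega

def split_condition_py (condition : String) : List String :=
  loopA condition.toList 0 [] [] 0 none

-- ===== PORT B =====
-- pass 1: record the (position, operator) of every top-level && / ||
def scanB (cs : List Char) (i : Nat) (depth : Int) (instr : Option Char) :
    List (Nat × List Char) :=
  if h : i < cs.length then
    let ch := cs[i]
    match instr with
    | some q =>
      if ch = '\\' then scanB cs (i+2) depth (some q)
      else if ch = q then scanB cs (i+1) depth none
      else scanB cs (i+1) depth (some q)
    | none =>
      if ch = '"' ∨ ch = '\'' then scanB cs (i+1) depth (some ch)
      else if ch = '(' ∨ ch = '[' ∨ ch = '{' then scanB cs (i+1) (depth + 1) none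
      else if ch = ')' ∨ ch = ']' ∨ ch = '}' then scanB cs (i+1) (depth - 1) none
      else if depth = 0 ∧ i+1 < cs.length ∧ ((ch = '&' ∧ cs[i+1]? = some '&') ∨ (ch = '|' ∧ cs[i+1]? = some '|')) then
        (i, ch :: cs[i+1]?.toList) :: scanB cs (i+2) depth none
      else scanB cs (i+1) depth none
  else []
termination_by cs.length - i
decreasing_by all_goals omega

-- pass 2: slice the original string at the recorded boundaries
def emitB (cs : List Char) (prefixOp : List Char) (start : Nat) :
    List (Nat × List Char) → List String
  | [] =>
      let last := PySem.Chars.strip (prefixOp ++ cs.drop start)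
      if last = [] then [] else [String.ofList last]
  | (pos, op) :: rest =>
      String.ofList (PySem.Chars.strip (prefixOp ++ (cs.drop start).take (pos - start)))
        :: emitB cs (op ++ [' ']) (pos + 2) rest

def split_condition_py_alt (condition : String) : List String :=
  emitB condition.toList [] 0 (scanB condition.toList 0 0 none)

-- ===== PRECONDITION & SPEC =====
def Spec_split_condition_py (condition : String) (out : List String) : Prop := out = split_condition_py_alt condition
instance (condition : String) (out : List String) : Decidable (Spec_split_condition_py condition out) := by unfold Spec_split_condition_py; infer_instance

-- ===== CLAIM (what is proved, stated in full; the proofs are below) =====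
def Claim_equal_split_condition_py : Prop := ∀ (condition : String), Dom_split_condition_py condition → Spec_split_condition_py condition (split_condition_py condition)

-- ===== LEMMAS AND PROOFS =====

-- extending a slice by one character
theorem take_push (cs : List Char) (start i : Nat) (h1 : start ≤ i) (h2 : i < cs.length) :
    (cs.drop start).take (i - start) ++ [cs[i]] = (cs.drop start).take (i + 1 - start) := by
  have he : i + 1 - start = (i - start) + 1 := by omega
  rw [he, List.take_add_one]
  have hg : (cs.drop start)[i - start]? = some cs[i] := by
    rw [List.getElem?_drop]
    have : start + (i - start) = i := by omega
    rw [this, List.getElem?_eq_getElem h2]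
  rw [hg]; rfl

-- slice saturation past the end
theorem take_sat (cs : List Char) (start i : Nat) (h : cs.length ≤ i) :
    (cs.drop start).take (i - start) = cs.drop start := by
  apply List.take_of_length_le
  simp; omega

-- A's accumulator is always prefix ++ slice; loopA from that state computes emitB over scanB's boundaries
theorem loopA_eq_emit (cs : List Char) (fuel : Nat) :
    ∀ i start pfx parts depth instr, cs.length - i ≤ fuel → start ≤ i →
    loopA cs i parts (pfx ++ (cs.drop start).take (i - start)) depth instr
      = parts ++ emitB cs pfx start (scanB cs i depth instr) := by
  induction fuel with
  | zero =>
    intro i start pfx parts depth instr hf hs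
    rw [loopA, scanB, dif_neg (by omega : ¬ i < cs.length), dif_neg (by omega : ¬ i < cs.length),
      take_sat cs start i (by omega)]
    simp only [emitB]
    split <;> simp
  | succ fuel ih =>
    intro i start pfx parts depth instr hf hs
    by_cases h : i < cs.length
    · have hpush : pfx ++ (cs.drop start).take (i - start) ++ [cs[i]]
          = pfx ++ (cs.drop start).take (i + 1 - start) := by
        rw [List.append_assoc, take_push cs start i hs h]
      match instr with
      | some q =>
        rw [loopA, scanB, dif_pos h, dif_pos h]; dsimp only
        by_cases hb : cs[i] = '\\'
        · rw [if_pos hb, if_pos hb]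
          by_cases h2 : i + 1 < cs.length
          · have hopt : cs[i+1]?.toList = [cs[i+1]] := by
              rw [List.getElem?_eq_getElem h2]; rfl
            have hpush2 : pfx ++ (cs.drop start).take (i - start) ++ [cs[i]] ++ cs[i+1]?.toList
                = pfx ++ (cs.drop start).take (i + 2 - start) := by
              rw [hopt, hpush]
              have : i + 2 - start = (i+1) + 1 - start := by omega
              rw [List.append_assoc, this, take_push cs start (i+1) (by omega) h2]
            rw [hpush2]
            exact ih (i+2) start pfx parts depth (some q) (by omega) (by omega)
          · have hopt : cs[i+1]?.toList = [] := by
              rw [List.getElem?_eq_none (by omega)]; rfl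
            have hpush2 : pfx ++ (cs.drop start).take (i - start) ++ [cs[i]] ++ cs[i+1]?.toList
                = pfx ++ (cs.drop start).take (i + 2 - start) := by
              rw [hopt, List.append_nil, hpush,
                take_sat cs start (i+2) (by omega), take_sat cs start (i+1) (by omega)]
            rw [hpush2]
            exact ih (i+2) start pfx parts depth (some q) (by omega) (by omega)
        · rw [if_neg hb, if_neg hb]
          by_cases hq : cs[i] = q
          · rw [if_pos hq, if_pos hq, hpush]
            exact ih (i+1) start pfx parts depth none (by omega) (by omega)
          · rw [if_neg hq, if_neg hq, hpush]
            exact ih (i+1) start pfx parts depth (some q) (by omega) (by omega)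
      | none =>
        rw [loopA, scanB, dif_pos h, dif_pos h]; dsimp only
        by_cases hq : cs[i] = '"' ∨ cs[i] = '\''
        · rw [if_pos hq, if_pos hq, hpush]
          exact ih (i+1) start pfx parts depth (some cs[i]) (by omega) (by omega)
        · rw [if_neg hq, if_neg hq]
          by_cases ho : cs[i] = '(' ∨ cs[i] = '[' ∨ cs[i] = '{'
          · rw [if_pos ho, if_pos ho, hpush]
            exact ih (i+1) start pfx parts (depth+1) none (by omega) (by omega)
          · rw [if_neg ho, if_neg ho]
            by_cases hc : cs[i] = ')' ∨ cs[i] = ']' ∨ cs[i] = '}'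
            · rw [if_pos hc, if_pos hc, hpush]
              exact ih (i+1) start pfx parts (depth-1) none (by omega) (by omega)
            · rw [if_neg hc, if_neg hc]
              by_cases hsp : depth = 0 ∧ i+1 < cs.length ∧ ((cs[i] = '&' ∧ cs[i+1]? = some '&') ∨ (cs[i] = '|' ∧ cs[i+1]? = some '|'))
              · rw [if_pos hsp, if_pos hsp]
                simp only [emitB]
                have hcur : cs[i] :: (cs[i+1]?.toList ++ [' '])
                    = (cs[i] :: (cs[i+1]?.toList ++ [' '])) ++ (cs.drop (i+2)).take (i+2-(i+2)) := by simp
                rw [hcur, ih (i+2) (i+2) _ _ depth none (by omega) (by omega)]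
                simp
              · rw [if_neg hsp, if_neg hsp, hpush]
                exact ih (i+1) start pfx parts depth none (by omega) (by omega)
    · rw [loopA, scanB, dif_neg h, dif_neg h, take_sat cs start i (by omega)]
      simp only [emitB]
      split <;> simp

-- ===== VERDICT (by name: the statement is the Claim_ definition above) =====
theorem split_condition_py_spec : Claim_equal_split_condition_py := by
  intro condition _
  unfold Spec_split_condition_py split_condition_py split_condition_py_alt
  have := loopA_eq_emit condition.toList condition.toList.length 0 0 [] [] 0 none
    (by omega) (by omega)
  simpa using this
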